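-- pv_equiv track=rewrite | github.com/casperfibaek/buteo | buteo/utils.py | step_ranges
-- ===== SOURCE A (Python) =====
-- def step_ranges(steps):
--     start_stop = []
--     last = 0
--     for num in range(0, len(steps)):
--         step_size = steps[num]
--         id = num + 1
--
--         start_stop.append({
--             "id": id,
--             "start": last,
--             "stop": last + step_size,
--         })
--
--         last += step_size
--
--     return start_stop
-- ===== SOURCE B (Python) =====
-- def step_ranges(steps):
--     bounds = [0]
--     for s in steps:
--         bounds.append(bounds[-1] + s)
--     return [
--         {"id": i + 1, "start": a, "stop": b}
--         for i, (a, b) in enumerate(zip(bounds, bounds[1:]))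
--     ]
-- ===== Notes on version B (the rewrite author's own statement) =====
-- stated objective: alternative
-- what changed: Replaces the single pass with a running 'last' accumulator and index-based range loop by materializing the prefix-sum boundary table first and then building the records in a second pairwise pass over enumerate(zip(bounds, bounds[1:])).
import Mathlib
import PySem

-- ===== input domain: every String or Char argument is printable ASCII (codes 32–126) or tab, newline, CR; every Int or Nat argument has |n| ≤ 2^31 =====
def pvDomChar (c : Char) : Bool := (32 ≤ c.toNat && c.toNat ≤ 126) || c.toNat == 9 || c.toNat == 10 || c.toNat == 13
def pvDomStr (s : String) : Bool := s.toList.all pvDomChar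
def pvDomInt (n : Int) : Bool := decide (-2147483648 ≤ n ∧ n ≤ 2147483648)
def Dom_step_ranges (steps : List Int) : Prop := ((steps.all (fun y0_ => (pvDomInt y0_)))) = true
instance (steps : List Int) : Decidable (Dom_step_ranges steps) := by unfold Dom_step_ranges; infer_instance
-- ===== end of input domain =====

-- B builds the prefix-sum boundary table first and then emits the records in a
-- second pairwise pass over consecutive boundaries; same cost, different decomposition.

-- ===== PORT A =====
-- running-accumulator loop over range(0, len(steps)); the index is always in
-- range, so pyGetD with default 0 is exact
def step_ranges (steps : List Int) : List (List (String × Int)) :=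
  let r := (PySem.List.pyRange 0 (steps.length : Int) 1).foldl
    (fun (st : List (List (String × Int)) × Int) num =>
      let step_size := PySem.List.pyGetD steps num 0
      let id := num + 1
      (st.1 ++ [[("id", id), ("start", st.2), ("stop", st.2 + step_size)]],
       st.2 + step_size))
    ([], 0)
  r.1

-- ===== PORT B =====
-- bounds[-1] is pyGetD bounds (-1) 0; bounds is never empty, so exact
def step_ranges_alt (steps : List Int) : List (List (String × Int)) :=
  let bounds := steps.foldl (fun b s => b ++ [PySem.List.pyGetD b (-1) 0 + s]) [0]
  (PySem.List.enumerate (bounds.zip (PySem.List.slice bounds (some 1) none)) 0).map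
    (fun p => [("id", p.1 + 1), ("start", p.2.1), ("stop", p.2.2)])

-- ===== PRECONDITION & SPEC =====
def Spec_step_ranges (steps : List Int) (out : List (List (String × Int))) : Prop := out = step_ranges_alt steps
instance (steps : List Int) (out : List (List (String × Int))) : Decidable (Spec_step_ranges steps out) := by unfold Spec_step_ranges; infer_instance

-- ===== CLAIM (what is proved, stated in full; the proofs are below) =====
def Claim_equal_step_ranges : Prop := ∀ (steps : List Int), Dom_step_ranges steps → Spec_step_ranges steps (step_ranges steps)

-- ===== LEMMAS AND PROOFS =====

-- reference result: records for suffix `ts`, next id `id`, running offset `last`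
def pvGo (id last : Int) : List Int → List (List (String × Int))
  | [] => []
  | s :: ts => [("id", id), ("start", last), ("stop", last + s)] :: pvGo (id + 1) (last + s) ts

-- strict prefix sums starting from x (excluding x itself)
def pvPs (x : Int) : List Int → List Int
  | [] => []
  | s :: ts => (x + s) :: pvPs (x + s) ts

theorem pvGetD_last (b : List Int) (x : Int) :
    PySem.List.pyGetD (b ++ [x]) (-1) 0 = x := by
  simp [PySem.List.pyGetD, PySem.List.pyGet?, PySem.List.pyIdx?]

theorem pvBounds_fold (steps : List Int) : ∀ (b : List Int) (x : Int),
    steps.foldl (fun b s => b ++ [PySem.List.pyGetD b (-1) 0 + s]) (b ++ [x])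
      = (b ++ [x]) ++ pvPs x steps := by
  induction steps with
  | nil => simp [pvPs]
  | cons s ts ih =>
    intro b x
    simp only [List.foldl_cons, pvGetD_last, pvPs]
    have := ih (b ++ [x]) (x + s)
    simpa using this

theorem pvA_fold (post : List Int) : ∀ (pre : List Int) (acc : List (List (String × Int))) (last : Int),
    ((PySem.List.pyRange (pre.length : Int) ((pre ++ post).length : Int) 1).foldl
      (fun (st : List (List (String × Int)) × Int) num =>
        (st.1 ++ [[("id", num + 1), ("start", st.2), ("stop", st.2 + PySem.List.pyGetD (pre ++ post) num 0)]],
         st.2 + PySem.List.pyGetD (pre ++ post) num 0))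
      (acc, last))
    = (acc ++ pvGo ((pre.length : Int) + 1) last post, last + post.sum) := by
  induction post with
  | nil => intro pre acc last; simp [PySem.List.pyRange_one_eq_nil, pvGo]
  | cons s ts ih =>
    intro pre acc last
    have hlt : (pre.length : Int) < ((pre ++ (s :: ts)).length : Int) := by
      push_cast [List.length_append, List.length_cons]; omega
    rw [PySem.List.pyRange_one_cons hlt, List.foldl_cons]
    have hget : PySem.List.pyGetD (pre ++ s :: ts) (pre.length : Int) 0 = s := by
      rw [PySem.List.pyGetD_natCast]
      simp
    rw [hget]
    have h2 := ih (pre ++ [s]) (acc ++ [[("id", (pre.length : Int) + 1), ("start", last), ("stop", last + s)]]) (last + s)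
    simp only [List.append_assoc, List.singleton_append, List.length_append,
      List.length_singleton] at h2 ⊢
    push_cast at h2 ⊢
    simpa [pvGo, add_assoc, add_comm, add_left_comm] using h2

theorem pvB_map (steps : List Int) : ∀ (last i : Int),
    (PySem.List.enumerate ((last :: pvPs last steps).zip (pvPs last steps)) i).map
      (fun p => [("id", p.1 + 1), ("start", p.2.1), ("stop", p.2.2)])
    = pvGo (i + 1) last steps := by
  induction steps with
  | nil => intro last i; simp [pvPs, pvGo]
  | cons s ts ih =>
    intro last i
    simp only [pvPs, pvGo, List.zip_cons_cons, PySem.List.enumerate_cons, List.map_cons]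
    exact congrArg _ (ih (last + s) (i + 1))

-- ===== VERDICT (by name: the statement is the Claim_ definition above) =====
theorem step_ranges_spec : Claim_equal_step_ranges := by
  intro steps _
  show step_ranges steps = step_ranges_alt steps
  have hb := pvBounds_fold steps [] 0
  simp only [List.nil_append] at hb
  have hA := pvA_fold steps [] [] 0
  simp only [List.nil_append, List.length_nil, Int.natCast_zero, zero_add] at hA
  have hslice : PySem.List.slice ([0] ++ pvPs 0 steps) (some 1) none
      = pvPs 0 steps := by simp [pysem]
  have hB := pvB_map steps 0 0
  simp only [step_ranges, step_ranges_alt, hb, hA, hslice]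
  simpa using hB.symm
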